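-- pv_equiv track=rewrite | github.com/CDMY0417/Tool_MATH | function_tools/function_total/mq1hlz.py | integer_partitions_with_limit
-- ===== SOURCE A (Python) =====
-- def integer_partitions_with_limit(n: int, max_parts: int):
--     def generate_partitions(n, max_val, max_parts, prefix=[]):
--         if n == 0 and len(prefix) <= max_parts:
--             yield prefix
--         for i in range(min(n, max_val), 0, -1):
--             if len(prefix) >= max_parts:
--                 continue
--             yield from generate_partitions(n - i, i, max_parts, prefix + [i])
--
--     return list(generate_partitions(n, n, max_parts))
-- ===== SOURCE B (Python) =====
-- def integer_partitions_with_limit(n: int, max_parts: int):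
--     results = []
--     stack = [(n, n, [])]
--     while stack:
--         remaining, max_val, prefix = stack.pop()
--         if remaining == 0 and len(prefix) <= max_parts:
--             results.append(prefix)
--         if len(prefix) < max_parts:
--             for i in range(1, min(remaining, max_val) + 1):
--                 stack.append((remaining - i, i, prefix + [i]))
--     return results
-- ===== Notes on version B (the rewrite author's own statement) =====
-- stated objective: alternative
-- what changed: The recursive generator is replaced by an iterative DFS over an explicit stack of (remaining, max_val, prefix) frames, pushing children in ascending order so the LIFO pop reproduces A's descending preorder; an accumulator list replaces yield.
import Mathlib
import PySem

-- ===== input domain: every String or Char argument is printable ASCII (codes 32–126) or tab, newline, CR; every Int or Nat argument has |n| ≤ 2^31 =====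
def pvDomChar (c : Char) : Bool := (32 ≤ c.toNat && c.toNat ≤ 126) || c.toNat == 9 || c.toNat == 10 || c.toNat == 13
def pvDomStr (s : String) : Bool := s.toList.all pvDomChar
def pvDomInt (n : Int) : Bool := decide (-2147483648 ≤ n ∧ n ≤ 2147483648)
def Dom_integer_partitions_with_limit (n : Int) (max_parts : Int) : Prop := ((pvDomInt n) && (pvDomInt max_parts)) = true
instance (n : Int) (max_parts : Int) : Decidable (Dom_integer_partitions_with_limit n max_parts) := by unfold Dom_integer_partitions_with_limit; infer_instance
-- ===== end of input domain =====

-- B replaces A's recursive generator by an iterative DFS with an explicit stack (children pushed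
-- ascending so LIFO pops reproduce A's descending preorder); same cost, different decomposition.

-- ===== PORT A =====
-- A's inner generator `generate_partitions(n, max_val, max_parts, prefix)`: the yielded items,
-- in order, as a list.  The loop `for i in range(min(n, max_val), 0, -1)` is a foldl over
-- `pyRange (min n max_val) 0 (-1)`.  The extra Nat argument is only a totality guard (fuel);
-- with the fuel `n.toNat + 1` supplied at the top level the guard branch is never reached,
-- since each recursive call strictly decreases `n.toNat`.
def genPartsF : Nat → Int → Int → Int → List Int → List (List Int)
  | 0, _, _, _, _ => []
  | fuel + 1, n, max_val, max_parts, pre =>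
    (PySem.List.pyRange (min n max_val) 0 (-1)).foldl
      (fun acc i =>
        if (pre.length : Int) ≥ max_parts then acc
        else acc ++ genPartsF fuel (n - i) i max_parts (pre ++ [i]))
      (if n = 0 ∧ (pre.length : Int) ≤ max_parts then [pre] else [])

def integer_partitions_with_limit (n : Int) (max_parts : Int) : List (List Int) :=
  genPartsF (n.toNat + 1) n n max_parts []

-- ===== PORT B =====
-- Termination measure for the stack loop: each frame with `remaining = r` weighs 2^(r.toNat).
def stackMeasure (st : List (Int × Int × List Int)) : Nat :=
  (st.map (fun f => 2 ^ f.1.toNat)).sum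

lemma foldl_cons_measure (l : List Int) (g : Int → Int × Int × List Int) :
    ∀ rest : List (Int × Int × List Int),
      stackMeasure (l.foldl (fun st i => g i :: st) rest)
        = (l.map (fun i => 2 ^ (g i).1.toNat)).sum + stackMeasure rest := by
  induction l with
  | nil => intro rest; simp
  | cons a l ih =>
    intro rest
    simp only [List.foldl_cons, List.map_cons, List.sum_cons, ih]
    simp [stackMeasure]
    omega

lemma sum_pow_two_range (R : Nat) :
    ∀ m : Nat, m ≤ R →
      ((List.range m).map (fun k => 2 ^ (R - 1 - k))).sum = 2 ^ R - 2 ^ (R - m) := by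
  intro m
  induction m with
  | zero => intro _; simp
  | succ m ih =>
    intro h
    rw [List.range_succ]
    simp only [List.map_append, List.sum_append, List.map_cons, List.sum_cons,
      List.map_nil, List.sum_nil]
    rw [ih (by omega)]
    rw [show R - 1 - m = R - (m + 1) from by omega]
    have h1 : 2 ^ (R - m) = 2 * 2 ^ (R - (m + 1)) := by
      rw [show R - m = (R - (m + 1)) + 1 from by omega, pow_succ']
    have h2 : 2 ^ (R - m) ≤ 2 ^ R := Nat.pow_le_pow_right (by norm_num) (by omega)
    omega

lemma pow_sum_bound (r M : Int) (hM : M ≤ r) :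
    ((PySem.List.pyRange 1 (M + 1) 1).map (fun i => 2 ^ (r - i).toNat)).sum
      < 2 ^ r.toNat := by
  by_cases h0 : M ≤ 0
  · rw [PySem.List.pyRange_one_eq_nil (by omega)]
    simp only [List.map_nil, List.sum_nil]
    exact Nat.pow_pos (by norm_num)
  · rw [PySem.List.pyRange_one, show (M + 1 - 1 : Int) = M from by ring, List.map_map]
    refine lt_of_eq_of_lt (b := ((List.range M.toNat).map
      (fun k => 2 ^ (r.toNat - 1 - k))).sum) ?_ ?_
    · refine congrArg List.sum (List.map_congr_left ?_)
      intro k hk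
      simp only [List.mem_range] at hk
      simp only [Function.comp_apply]
      congr 1
      omega
    · rw [sum_pow_two_range r.toNat M.toNat (by omega)]
      have h1 : 0 < 2 ^ (r.toNat - M.toNat) := Nat.pow_pos (by norm_num)
      have h2 : 2 ^ (r.toNat - M.toNat) ≤ 2 ^ r.toNat :=
        Nat.pow_le_pow_right (by norm_num) (by omega)
      omega

lemma push_measure_lt (r mv : Int) (p : List Int) (rest : List (Int × Int × List Int)) :
    stackMeasure ((PySem.List.pyRange 1 (min r mv + 1) 1).foldl
        (fun st i => (r - i, i, p ++ [i]) :: st) rest)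
      < stackMeasure ((r, mv, p) :: rest) := by
  rw [foldl_cons_measure]
  have hb := pow_sum_bound r (min r mv) (min_le_left _ _)
  simp only [stackMeasure, List.map_cons, List.sum_cons] at *
  omega

-- B's while-loop over the stack; the Python list's top (its end) is the head here, so
-- `stack.pop()` is the head and the ascending `for i in range(1, min(remaining, max_val)+1):
-- stack.append(...)` is a foldl that conses each child frame on top.
def partLoop (max_parts : Int) (stack : List (Int × Int × List Int))
    (results : List (List Int)) : List (List Int) :=
  match stack with
  | [] => results
  | (remaining, max_val, pre) :: rest =>
    partLoop max_parts
      (if (pre.length : Int) < max_parts then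
          (PySem.List.pyRange 1 (min remaining max_val + 1) 1).foldl
            (fun st i => (remaining - i, i, pre ++ [i]) :: st) rest
        else rest)
      (if remaining = 0 ∧ (pre.length : Int) ≤ max_parts then results ++ [pre] else results)
termination_by stackMeasure stack
decreasing_by
  split_ifs with h
  · exact push_measure_lt remaining max_val pre rest
  · have hpos : 0 < 2 ^ remaining.toNat := Nat.pow_pos (by norm_num)
    simp only [stackMeasure, List.map_cons, List.sum_cons]
    omega

def integer_partitions_with_limit_alt (n : Int) (max_parts : Int) : List (List Int) :=
  partLoop max_parts [(n, n, [])] []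

-- ===== PRECONDITION & SPEC =====
def Spec_integer_partitions_with_limit (n : Int) (max_parts : Int) (out : List (List Int)) : Prop := out = integer_partitions_with_limit_alt n max_parts
instance (n : Int) (max_parts : Int) (out : List (List Int)) : Decidable (Spec_integer_partitions_with_limit n max_parts out) := by unfold Spec_integer_partitions_with_limit; infer_instance

-- ===== CLAIM (what is proved, stated in full; the proofs are below) =====
def Claim_equal_integer_partitions_with_limit : Prop := ∀ (n : Int) (max_parts : Int), Dom_integer_partitions_with_limit n max_parts → Spec_integer_partitions_with_limit n max_parts (integer_partitions_with_limit n max_parts)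

-- ===== LEMMAS AND PROOFS =====

lemma foldl_cons_stack {α β : Type} (l : List α) (g : α → β) :
    ∀ rest : List β, l.foldl (fun st i => g i :: st) rest = (l.map g).reverse ++ rest := by
  induction l with
  | nil => intro rest; simp
  | cons a l ih => intro rest; simp [ih]

-- The fuel argument is irrelevant as long as it exceeds n.toNat.
lemma genPartsF_mono : ∀ (fuel : Nat) (n mv mp : Int) (p : List Int), n.toNat < fuel →
    genPartsF fuel n mv mp p = genPartsF (n.toNat + 1) n mv mp p := by
  intro fuel
  induction fuel using Nat.strong_induction_on with
  | _ fuel ih =>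
    intro n mv mp p h
    obtain ⟨f, rfl⟩ : ∃ f, fuel = f + 1 := ⟨fuel - 1, by omega⟩
    simp only [genPartsF]
    apply PySem.List.foldl_congr_mem
    intro acc i hi
    have hb := PySem.List.mem_pyRange_neg_one.mp hi
    by_cases hc : (p.length : Int) ≥ mp
    · simp [hc]
    · rw [if_neg hc, if_neg hc,
        ih f (by omega) (n - i) i mp (p ++ [i]) (by omega),
        ih n.toNat (by omega) (n - i) i mp (p ++ [i]) (by omega)]

-- One-step characterisation of A's generator (at its canonical fuel): the emitted prefix, then
-- (unless the prefix is already full) the flatMap of the recursive calls over the descending range.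
lemma foldl_if_extend {α β : Type} (c : Prop) [inst : Decidable c] (hc : ¬ c)
    (G : α → List β) (l : List α) :
    ∀ b : List β, l.foldl (fun acc x => if c then acc else acc ++ G x) b = b ++ l.flatMap G := by
  induction l with
  | nil => intro b; simp
  | cons a l ih =>
    intro b
    simp only [List.foldl_cons]
    rw [if_neg hc, ih, List.flatMap_cons, List.append_assoc]

lemma genParts_eq (n mv mp : Int) (p : List Int) :
    genPartsF (n.toNat + 1) n mv mp p =
      (if n = 0 ∧ (p.length : Int) ≤ mp then [p] else []) ++
        (if (p.length : Int) ≥ mp then []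
         else (PySem.List.pyRange (min n mv) 0 (-1)).flatMap
            (fun i => genPartsF ((n - i).toNat + 1) (n - i) i mp (p ++ [i]))) := by
  conv_lhs => rw [genPartsF]
  by_cases hc : (p.length : Int) ≥ mp
  · have hcong : ∀ (acc : List (List Int)) (i : Int),
        i ∈ PySem.List.pyRange (min n mv) 0 (-1) →
        (if (p.length : Int) ≥ mp then acc
         else acc ++ genPartsF n.toNat (n - i) i mp (p ++ [i])) = acc := by
      intro acc i _
      rw [if_pos hc]
    rw [PySem.List.foldl_congr_mem _ _ (fun acc _ => acc) _ hcong, PySem.List.foldl_ignore, if_pos hc]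
    simp
  · have hcong : ∀ (acc : List (List Int)) (i : Int),
        i ∈ PySem.List.pyRange (min n mv) 0 (-1) →
        (if (p.length : Int) ≥ mp then acc
         else acc ++ genPartsF n.toNat (n - i) i mp (p ++ [i]))
          = (if (p.length : Int) ≥ mp then acc
             else acc ++ genPartsF ((n - i).toNat + 1) (n - i) i mp (p ++ [i])) := by
      intro acc i hi
      have hb := PySem.List.mem_pyRange_neg_one.mp hi
      rw [if_neg hc, if_neg hc, genPartsF_mono n.toNat (n - i) i mp (p ++ [i]) (by omega)]
    rw [PySem.List.foldl_congr_mem _ _ _ _ hcong, foldl_if_extend _ hc, if_neg hc]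

def genF (mp : Int) (f : Int × Int × List Int) : List (List Int) :=
  genPartsF (f.1.toNat + 1) f.1 f.2.1 mp f.2.2

lemma partLoop_eq (mp : Int) (m : Nat) :
    ∀ (stack : List (Int × Int × List Int)) (results : List (List Int)),
      stackMeasure stack ≤ m →
      partLoop mp stack results = results ++ (stack.map (genF mp)).flatten := by
  induction m with
  | zero =>
    intro stack results hm
    match stack with
    | [] => simp [partLoop]
    | (r, mv, p) :: rest =>
      exfalso
      have hpos : 0 < 2 ^ r.toNat := Nat.pow_pos (by norm_num)
      simp only [stackMeasure, List.map_cons, List.sum_cons] at hm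
      omega
  | succ m ih =>
    intro stack results hm
    match stack with
    | [] => simp [partLoop]
    | (r, mv, p) :: rest =>
      rw [partLoop]
      by_cases hp : (p.length : Int) < mp
      · rw [if_pos hp]
        have hlt := push_measure_lt r mv p rest
        have hle : stackMeasure ((PySem.List.pyRange 1 (min r mv + 1) 1).foldl
            (fun st i => (r - i, i, p ++ [i]) :: st) rest) ≤ m := by omega
        rw [ih _ _ hle]
        rw [foldl_cons_stack]
        have hrev : (PySem.List.pyRange 1 (min r mv + 1) 1).reverse
            = PySem.List.pyRange (min r mv) 0 (-1) :=
          (PySem.List.pyRange_neg_one_eq_reverse (min r mv) 0).symm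
        have key : (((PySem.List.pyRange 1 (min r mv + 1) 1).map
              (fun i => (r - i, i, p ++ [i]))).reverse).map (genF mp)
            = (PySem.List.pyRange (min r mv) 0 (-1)).map
                (genF mp ∘ fun i => (r - i, i, p ++ [i])) := by
          rw [← hrev]
          simp [List.map_reverse, List.map_map]
        simp only [List.map_append, List.flatten_append, key]
        have hgen : genF mp (r, mv, p)
            = (if r = 0 ∧ (p.length : Int) ≤ mp then [p] else []) ++
              ((PySem.List.pyRange (min r mv) 0 (-1)).map
                  (genF mp ∘ fun i => (r - i, i, p ++ [i]))).flatten := by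
          show genPartsF (r.toNat + 1) r mv mp p = _
          rw [genParts_eq, if_neg (show ¬((p.length : Int) ≥ mp) from by omega)]
          congr 1
        simp only [List.map_cons, List.flatten_cons, hgen]
        by_cases he : r = 0 ∧ (p.length : Int) ≤ mp
        · simp [he]
        · simp [he]
      · rw [if_neg hp]
        have hrest : stackMeasure rest ≤ m := by
          have hpos : 0 < 2 ^ r.toNat := Nat.pow_pos (by norm_num)
          simp only [stackMeasure, List.map_cons, List.sum_cons] at hm
          simp only [stackMeasure]
          omega
        rw [ih rest _ hrest]
        have hgen : genF mp (r, mv, p)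
            = (if r = 0 ∧ (p.length : Int) ≤ mp then [p] else []) := by
          show genPartsF (r.toNat + 1) r mv mp p = _
          rw [genParts_eq, if_pos (show (p.length : Int) ≥ mp from by omega),
            List.append_nil]
        simp only [List.map_cons, List.flatten_cons, hgen]
        by_cases he : r = 0 ∧ (p.length : Int) ≤ mp
        · simp [he]
        · simp [he]

-- ===== VERDICT (by name: the statement is the Claim_ definition above) =====
theorem integer_partitions_with_limit_spec : Claim_equal_integer_partitions_with_limit := by
  intro n max_parts _
  unfold Spec_integer_partitions_with_limit
  show integer_partitions_with_limit n max_parts = integer_partitions_with_limit_alt n max_parts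
  unfold integer_partitions_with_limit integer_partitions_with_limit_alt
  rw [partLoop_eq max_parts (stackMeasure [(n, n, [])]) [(n, n, [])] [] le_rfl]
  simp [genF]
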